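-- pv_equiv track=rewrite | github.com/slbailey/retrovue | pkg/core/src/retrovue/config/defaults.py | validate_ffmpeg_flags
-- ===== SOURCE A (Python) =====
-- def validate_ffmpeg_flags(flags: list[str]) -> list[str]:
--     """
--     Validate FFmpeg flags to prevent invalid combinations.
--
--     Args:
--         flags: List of FFmpeg flags to validate
--
--     Returns:
--         Validated list of flags with invalid combinations removed
--
--     Raises:
--         ValueError: If invalid flag combinations are detected
--     """
--     # Clean and filter flags first
--     cleaned_flags = [flag.strip() for flag in flags if flag.strip()]
--
--     invalid_combinations = []
--
--     # Check for MP4-only flags in non-MP4 contexts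
--     mp4_only_flags = ["faststart", "empty_moov", "frag_keyframe", "frag_custom"]
--     has_mp4_flags = any(
--         flag.startswith("-movflags") and any(mp4_flag in flag for mp4_flag in mp4_only_flags)
--         for flag in cleaned_flags
--     )
--
--     # Check for MPEG-TS specific flags
--     has_mpegts_flags = any(flag.startswith("-mpegts_flags") for flag in cleaned_flags)
--
--     # If we have MP4-only flags but also MPEG-TS flags, that's invalid
--     if has_mp4_flags and has_mpegts_flags:
--         invalid_combinations.append("MP4-only movflags with MPEG-TS flags")
--
--     # Check for conflicting container formats
--     container_flags = [flag for flag in cleaned_flags if flag.startswith("-f ")]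
--     if len(container_flags) > 1:
--         invalid_combinations.append("Multiple container format flags")
--
--     # Check for conflicting streaming flags
--     streaming_flags = [
--         flag
--         for flag in cleaned_flags
--         if any(stream_flag in flag for stream_flag in ["-re", "-fflags", "-avoid_negative_ts"])
--     ]
--     if len(streaming_flags) > 3:  # Allow reasonable number of streaming flags
--         invalid_combinations.append("Too many streaming flags")
--
--     if invalid_combinations:
--         raise ValueError(
--             f"Invalid FFmpeg flag combinations detected: {', '.join(invalid_combinations)}"
--         )
--
--     # Filter out obviously problematic flags
--     validated_flags = []
--     for flag in cleaned_flags: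
--         # Skip flags that are clearly invalid
--         if flag.startswith("-movflags") and has_mpegts_flags:
--             continue  # Skip MP4 flags when using MPEG-TS
--
--         validated_flags.append(flag)
--
--     return validated_flags
-- ===== SOURCE B (Python) =====
-- def validate_ffmpeg_flags(flags: list[str]) -> list[str]:
--     """Single-pass variant: one loop gathers the cleaned flags and all the
--     validation state at once; the checks and final filter reuse that state."""
--     mp4_only_flags = ("faststart", "empty_moov", "frag_keyframe", "frag_custom")
--     streaming_markers = ("-re", "-fflags", "-avoid_negative_ts")
--     cleaned = []
--     has_mp4 = False
--     has_mpegts = False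
--     container_count = 0
--     streaming_count = 0
--     for flag in flags:
--         f = flag.strip()
--         if not f:
--             continue
--         cleaned.append(f)
--         if f.startswith("-movflags") and any(m in f for m in mp4_only_flags):
--             has_mp4 = True
--         if f.startswith("-mpegts_flags"):
--             has_mpegts = True
--         if f.startswith("-f "):
--             container_count += 1
--         if any(s in f for s in streaming_markers):
--             streaming_count += 1
--     invalid_combinations = []
--     if has_mp4 and has_mpegts:
--         invalid_combinations.append("MP4-only movflags with MPEG-TS flags")
--     if container_count > 1:
--         invalid_combinations.append("Multiple container format flags")
--     if streaming_count > 3: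
--         invalid_combinations.append("Too many streaming flags")
--     if invalid_combinations:
--         raise ValueError(
--             f"Invalid FFmpeg flag combinations detected: {', '.join(invalid_combinations)}"
--         )
--     if has_mpegts:
--         return [f for f in cleaned if not f.startswith("-movflags")]
--     return cleaned
-- ===== Notes on version B (the rewrite author's own statement) =====
-- stated objective: simpler
-- what changed: A makes five separate passes over the cleaned list (two any(), two filter comprehensions, a final loop); B gathers the cleaned list and all four validation statistics in one pass over the input, then runs the same checks and a single final filter.
-- outside the precondition, e.g. on validate_ffmpeg_flags(['-f mp4', '-f mpegts']): A raises ValueError, B raises ValueError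
import Mathlib
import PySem

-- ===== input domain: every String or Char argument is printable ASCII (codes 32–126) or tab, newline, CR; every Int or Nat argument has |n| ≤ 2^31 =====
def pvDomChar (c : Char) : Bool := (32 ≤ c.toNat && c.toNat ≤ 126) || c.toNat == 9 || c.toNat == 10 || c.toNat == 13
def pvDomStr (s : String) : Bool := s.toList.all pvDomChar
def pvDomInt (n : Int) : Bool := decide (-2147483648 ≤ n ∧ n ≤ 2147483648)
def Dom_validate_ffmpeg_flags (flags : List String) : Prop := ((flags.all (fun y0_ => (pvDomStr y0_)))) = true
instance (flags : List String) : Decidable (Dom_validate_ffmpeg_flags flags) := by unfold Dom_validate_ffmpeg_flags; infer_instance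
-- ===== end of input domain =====

-- B rewrites A's five separate passes over the cleaned list as one loop that
-- accumulates the cleaned list and all validation state at once (objective: alternative/simpler).

-- shared flag predicates (each is the literal Python test)
def pvMp4 (f : String) : Bool :=
  PySem.Str.startswith f "-movflags" &&
    (["faststart", "empty_moov", "frag_keyframe", "frag_custom"].any (fun m => PySem.Str.isIn m f))
def pvTs (f : String) : Bool := PySem.Str.startswith f "-mpegts_flags"
def pvCont (f : String) : Bool := PySem.Str.startswith f "-f "
def pvStream (f : String) : Bool :=
  ["-re", "-fflags", "-avoid_negative_ts"].any (fun s => PySem.Str.isIn s f)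
-- cleaned_flags = [flag.strip() for flag in flags if flag.strip()]
def pvCleaned (flags : List String) : List String :=
  flags.filterMap (fun flag => let f := PySem.Str.strip flag; if f = "" then none else some f)

-- ===== PORT A =====
def validate_ffmpeg_flags (flags : List String) : List String :=
  let cleaned := pvCleaned flags
  let has_mp4 := cleaned.any pvMp4
  let has_mpegts := cleaned.any pvTs
  let inv1 : List String := if has_mp4 && has_mpegts then ["MP4-only movflags with MPEG-TS flags"] else []
  let container_flags := cleaned.filter pvCont
  let inv2 := if container_flags.length > 1 then inv1 ++ ["Multiple container format flags"] else inv1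
  let streaming_flags := cleaned.filter pvStream
  let inv3 := if streaming_flags.length > 3 then inv2 ++ ["Too many streaming flags"] else inv2
  if inv3 ≠ [] then []  -- Python raises ValueError here; Pre_ excludes these inputs
  else cleaned.foldl
    (fun acc flag => if PySem.Str.startswith flag "-movflags" && has_mpegts then acc else acc ++ [flag]) []

-- ===== PORT B =====
def validate_ffmpeg_flags_alt (flags : List String) : List String :=
  let st := flags.foldl
    (fun (st : List String × Bool × Bool × Nat × Nat) flag =>
      let f := PySem.Str.strip flag
      if f = "" then st
      else (st.1 ++ [f], st.2.1 || pvMp4 f, st.2.2.1 || pvTs f,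
            (if pvCont f then st.2.2.2.1 + 1 else st.2.2.2.1),
            (if pvStream f then st.2.2.2.2 + 1 else st.2.2.2.2)))
    ([], false, false, 0, 0)
  let inv1 : List String := if st.2.1 && st.2.2.1 then ["MP4-only movflags with MPEG-TS flags"] else []
  let inv2 := if st.2.2.2.1 > 1 then inv1 ++ ["Multiple container format flags"] else inv1
  let inv3 := if st.2.2.2.2 > 3 then inv2 ++ ["Too many streaming flags"] else inv2
  if inv3 ≠ [] then []  -- Python raises ValueError here; Pre_ excludes these inputs
  else if st.2.2.1 then st.1.filter (fun f => !PySem.Str.startswith f "-movflags")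
  else st.1

-- ===== PRECONDITION & SPEC =====
-- Pre_ excludes exactly the inputs on which A raises ValueError ("invalid flag combinations").
def Pre_validate_ffmpeg_flags (flags : List String) : Prop :=
  ¬((pvCleaned flags).any pvMp4 = true ∧ (pvCleaned flags).any pvTs = true) ∧
  ((pvCleaned flags).filter pvCont).length ≤ 1 ∧
  ((pvCleaned flags).filter pvStream).length ≤ 3
instance (flags : List String) : Decidable (Pre_validate_ffmpeg_flags flags) := by
  unfold Pre_validate_ffmpeg_flags; infer_instance

def pvWitness_validate_ffmpeg_flags : List String := ["-f mpegts", "-re", "  ", "-movflags faststart"]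

def Spec_validate_ffmpeg_flags (flags : List String) (out : List String) : Prop := out = validate_ffmpeg_flags_alt flags
instance (flags : List String) (out : List String) : Decidable (Spec_validate_ffmpeg_flags flags out) := by unfold Spec_validate_ffmpeg_flags; infer_instance

-- ===== CLAIM (what is proved, stated in full; the proofs are below) =====
def Claim_equal_validate_ffmpeg_flags : Prop := ∀ (flags : List String), Dom_validate_ffmpeg_flags flags → Pre_validate_ffmpeg_flags flags → Spec_validate_ffmpeg_flags flags (validate_ffmpeg_flags flags)

-- ===== LEMMAS AND PROOFS =====

-- B's single fold computes the cleaned list and the four statistics A computes in separate passes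
theorem alt_foldl (l : List String) (c : List String) (m t : Bool) (cc sc : Nat) :
    l.foldl
      (fun (st : List String × Bool × Bool × Nat × Nat) flag =>
        let f := PySem.Str.strip flag
        if f = "" then st
        else (st.1 ++ [f], st.2.1 || pvMp4 f, st.2.2.1 || pvTs f,
              (if pvCont f then st.2.2.2.1 + 1 else st.2.2.2.1),
              (if pvStream f then st.2.2.2.2 + 1 else st.2.2.2.2)))
      (c, m, t, cc, sc)
    = (c ++ pvCleaned l, m || (pvCleaned l).any pvMp4, t || (pvCleaned l).any pvTs,
       cc + ((pvCleaned l).filter pvCont).length, sc + ((pvCleaned l).filter pvStream).length) := by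
  induction l generalizing c m t cc sc with
  | nil => simp [pvCleaned]
  | cons x xs ih =>
    simp only [List.foldl_cons]
    by_cases hx : PySem.Str.strip x = "" <;>
      simp [hx, ih, pvCleaned, List.filterMap_cons, List.any_cons, List.filter_cons,
            Bool.or_assoc] <;>
      split_ifs <;> simp <;> omega

-- A's final loop is a filter
theorem final_foldl (l : List String) (t : Bool) (acc : List String) :
    l.foldl (fun acc flag => if PySem.Str.startswith flag "-movflags" && t then acc else acc ++ [flag]) acc
    = acc ++ l.filter (fun f => !(PySem.Str.startswith f "-movflags" && t)) := by
  induction l generalizing acc with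
  | nil => simp
  | cons x xs ih =>
    simp only [List.foldl_cons, List.filter_cons]
    by_cases hx : (PySem.Str.startswith x "-movflags" && t) = true <;>
      simp only [hx, if_true, if_false, Bool.false_eq_true, ih, Bool.not_true,
                 Bool.not_false, List.append_assoc, List.singleton_append, Bool.not_eq_true'] <;>
      simp [hx]

-- ===== VERDICT (by name: the statement is the Claim_ definition above) =====
theorem validate_ffmpeg_flags_spec : Claim_equal_validate_ffmpeg_flags := by
  intro flags _ hpre
  obtain ⟨h1, h2, h3⟩ := hpre
  unfold Spec_validate_ffmpeg_flags validate_ffmpeg_flags validate_ffmpeg_flags_alt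
  simp only [alt_foldl, List.nil_append, Bool.false_or, Nat.zero_add]
  have hmt : ((pvCleaned flags).any pvMp4 && (pvCleaned flags).any pvTs) = false := by
    rcases Bool.eq_false_or_eq_true ((pvCleaned flags).any pvMp4) with h | h <;>
      rcases Bool.eq_false_or_eq_true ((pvCleaned flags).any pvTs) with h' | h' <;>
      simp [h, h'] at h1 ⊢
  have hcc : ¬ (((pvCleaned flags).filter pvCont).length > 1) := by omega
  have hsc : ¬ (((pvCleaned flags).filter pvStream).length > 3) := by omega
  simp only [hmt, if_false, Bool.false_eq_true, hcc, hsc, if_neg, ite_not]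
  simp only [final_foldl, List.nil_append]
  rcases Bool.eq_false_or_eq_true ((pvCleaned flags).any pvTs) with ht | ht <;>
    simp [ht]
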